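-- pv_equiv track=rewrite | github.com/Kenspectacle/BytecodeTexelite | for_testing/extract.py | extract_bc_filename
-- ===== SOURCE A (Python) =====
-- def extract_bc_filename(line):
--     """Extract the filename from a line containing 'Compiled from'."""
--     dot_index = line.find('.')
--     if dot_index != -1:
--         substring = line[dot_index + 1:]
--         end_index = len(substring)
--         for i, char in enumerate(substring):
--             if char.isspace():
--                 end_index = i
--                 break
--         return substring[:end_index]
--     return None
-- ===== SOURCE B (Python) =====
-- def extract_bc_filename(line):
--     """Extract the filename from a line containing 'Compiled from'."""
--     found = False
--     out = []
--     for ch in line: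
--         if found:
--             if ch.isspace():
--                 break
--             out.append(ch)
--         elif ch == '.':
--             found = True
--     return ''.join(out) if found else None
-- ===== Notes on version B (the rewrite author's own statement) =====
-- stated objective: alternative
-- what changed: Replaces the str.find-then-slice-then-indexed-enumerate scan with a single left-to-right pass over the characters carrying a seen-dot state flag and an output accumulator.
import Mathlib
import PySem

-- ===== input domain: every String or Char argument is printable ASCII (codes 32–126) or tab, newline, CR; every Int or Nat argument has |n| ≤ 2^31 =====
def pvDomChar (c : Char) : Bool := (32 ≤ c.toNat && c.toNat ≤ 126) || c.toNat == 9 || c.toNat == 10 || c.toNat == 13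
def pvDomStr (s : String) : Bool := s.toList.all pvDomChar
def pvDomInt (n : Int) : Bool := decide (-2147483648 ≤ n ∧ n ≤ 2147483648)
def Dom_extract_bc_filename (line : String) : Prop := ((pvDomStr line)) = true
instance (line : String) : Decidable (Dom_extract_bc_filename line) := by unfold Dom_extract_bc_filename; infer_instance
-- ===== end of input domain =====

-- B replaces A's find('.') + slice + indexed whitespace scan with one left-to-right pass
-- carrying a seen-dot flag and an output accumulator (objective: alternative, same cost).

-- ===== PORT A =====
-- A's enumerate loop: first index (offset i) whose char is whitespace, else the initial end_index (total).
def pvEndIdx : List Char → Nat → Nat → Nat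
  | [], _, total => total
  | c :: rest, i, total => if PySem.Chars.isspace c then i else pvEndIdx rest (i + 1) total

def extract_bc_filename (line : String) : Option String :=
  let cs := line.toList
  let dot_index := PySem.Chars.find cs ['.']
  if dot_index ≠ -1 then
    let substring := PySem.List.slice cs (some (dot_index + 1)) none
    let end_index := pvEndIdx substring 0 substring.length
    some (String.ofList (PySem.List.slice substring none (some (end_index : Int))))
  else
    none

-- ===== PORT B =====
-- B's single pass: found = seen a dot yet, out = collected chars; break at whitespace after the dot.
def pvBGo : List Char → Bool → List Char → Option (List Char)
  | [], found, out => if found then some out else none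
  | c :: rest, found, out =>
    if found then
      if PySem.Chars.isspace c then some out
      else pvBGo rest found (out ++ [c])
    else if c == '.' then pvBGo rest true out
    else pvBGo rest false out

def extract_bc_filename_alt (line : String) : Option String :=
  (pvBGo line.toList false []).map String.ofList

-- ===== PRECONDITION & SPEC =====
def Spec_extract_bc_filename (line : String) (out : Option String) : Prop := out = extract_bc_filename_alt line
instance (line : String) (out : Option String) : Decidable (Spec_extract_bc_filename line out) := by unfold Spec_extract_bc_filename; infer_instance

-- ===== CLAIM (what is proved, stated in full; the proofs are below) =====
def Claim_equal_extract_bc_filename : Prop := ∀ (line : String), Dom_extract_bc_filename line → Spec_extract_bc_filename line (extract_bc_filename line)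

-- ===== LEMMAS AND PROOFS =====

theorem pvBGo_none (cs : List Char) (h : '.' ∉ cs) : pvBGo cs false [] = none := by
  induction cs with
  | nil => rfl
  | cons c rest ih =>
    simp only [List.mem_cons, not_or] at h
    have hc : ¬ c = '.' := fun e => h.1 e.symm
    simp [pvBGo, hc, ih h.2]

theorem pvBGo_true (cs : List Char) (out : List Char) :
    pvBGo cs true out = some (out ++ cs.takeWhile (fun c => !PySem.Chars.isspace c)) := by
  induction cs generalizing out with
  | nil => simp [pvBGo]
  | cons c rest ih =>
    by_cases hs : PySem.Chars.isspace c
    · simp [pvBGo, hs]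
    · simp [pvBGo, hs, ih]

theorem pvBGo_skip (pre rest : List Char) (h : '.' ∉ pre) :
    pvBGo (pre ++ '.' :: rest) false [] = pvBGo rest true [] := by
  induction pre with
  | nil => simp [pvBGo]
  | cons c t ih =>
    simp only [List.mem_cons, not_or] at h
    have hc : ¬ c = '.' := fun e => h.1 e.symm
    simp [pvBGo, hc, ih h.2]

theorem pvEndIdx_spec (cs : List Char) (i total : Nat) (h : total = i + cs.length) :
    pvEndIdx cs i total = i + (cs.takeWhile (fun c => !PySem.Chars.isspace c)).length := by
  induction cs generalizing i with
  | nil => simpa [pvEndIdx] using h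
  | cons c rest ih =>
    by_cases hs : PySem.Chars.isspace c
    · simp [pvEndIdx, hs]
    · have := ih (i + 1) (by simp at h; omega)
      simp [pvEndIdx, hs, this]
      omega

theorem first_dot_split (cs : List Char) (h : '.' ∈ cs) :
    ∃ pre rest, cs = pre ++ '.' :: rest ∧ '.' ∉ pre := by
  induction cs with
  | nil => cases h
  | cons c t ih =>
    by_cases hc : c = '.'
    · exact ⟨[], t, by simp [hc], by simp⟩
    · rw [List.mem_cons] at h
      obtain ⟨pre, rest, heq, hni⟩ := ih (h.resolve_left (fun e => hc e.symm))
      refine ⟨c :: pre, rest, by simp [heq], ?_⟩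
      simp only [List.mem_cons, not_or]
      exact ⟨fun e => hc e.symm, hni⟩

theorem find_first_dot (pre rest : List Char) (h : '.' ∉ pre) :
    PySem.Chars.find (pre ++ '.' :: rest) ['.'] = (pre.length : Int) := by
  set cs := pre ++ '.' :: rest with hcs
  have hinf : ['.'] <:+: cs := ⟨pre, rest, by simp [hcs]⟩
  have hnn : 0 ≤ PySem.Chars.find cs ['.'] := (PySem.Chars.find_nonneg_iff cs ['.']).2 hinf
  obtain ⟨hpref, hmin⟩ := PySem.Chars.find_spec hnn
  set n := (PySem.Chars.find cs ['.']).toNat with hn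
  have hle : ¬ n < pre.length := by
    intro hlt
    have hdrop : cs.drop n = pre.drop n ++ '.' :: rest := by
      simp [hcs, List.drop_append_of_le_length (le_of_lt hlt)]
    rw [hdrop] at hpref
    obtain ⟨t, ht⟩ := hpref
    have hne : pre.drop n ≠ [] := by
      intro he; rw [List.drop_eq_nil_iff] at he; omega
    obtain ⟨a, as, ha⟩ := List.exists_cons_of_ne_nil hne
    have : a = '.' := by
      rw [ha] at ht; simpa using congrArg (·.head?) ht.symm
    have : '.' ∈ pre := by
      rw [← this]; exact List.mem_of_mem_drop (by rw [ha]; exact List.mem_cons_self)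
    exact h this
  have hge : ¬ pre.length < n := by
    intro hlt
    apply hmin pre.length hlt
    rw [hcs, List.drop_left]
    exact ⟨rest, rfl⟩
  have : n = pre.length := by omega
  omega

theorem take_takeWhile (P : Char → Bool) (cs : List Char) :
    cs.take (cs.takeWhile P).length = cs.takeWhile P := by
  induction cs with
  | nil => rfl
  | cons c rest ih =>
    by_cases hP : P c
    · simp [hP, ih]
    · simp [hP]

-- ===== VERDICT (by name: the statement is the Claim_ definition above) =====
theorem extract_bc_filename_spec : Claim_equal_extract_bc_filename := by
  intro line _
  unfold Spec_extract_bc_filename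
  simp only [extract_bc_filename, extract_bc_filename_alt]
  by_cases hm : '.' ∈ line.toList
  · obtain ⟨pre, rest, heq, hni⟩ := first_dot_split line.toList hm
    rw [heq, find_first_dot pre rest hni, pvBGo_skip pre rest hni, pvBGo_true]
    have hfind : (pre.length : Int) ≠ -1 := by omega
    simp only [hfind, if_pos, ne_eq, not_false_iff]
    have hslice : PySem.List.slice (pre ++ '.' :: rest) (some ((pre.length : Int) + 1)) none
        = rest := by
      have : ((pre.length : Int) + 1) = (((pre.length + 1 : Nat)) : Int) := by push_cast; ring
      rw [this, PySem.List.slice_from_natCast]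
      simp
    rw [hslice]
    rw [pvEndIdx_spec rest 0 rest.length (by omega), Nat.zero_add,
      PySem.List.slice_to_natCast, take_takeWhile]
    simp
  · have : ¬ ['.'] <:+: line.toList := by
      intro ⟨p, s, hps⟩
      exact hm (by rw [← hps]; simp)
    rw [PySem.Chars.find_eq_neg_one_iff line.toList ['.'] |>.2 this]
    simp [pvBGo_none line.toList hm]
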